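-- pv_equiv track=rewrite | github.com/scottvr/jelp | ctf/harness.py | _policy_violation
-- ===== SOURCE A (Python) =====
-- def _policy_violation(mode: str, tokens: list[str]) -> str | None:
--     jelp_tokens = {
--         "--jelp",
--         "--jelp-pretty",
--         "--jelp-no-meta",
--         "--jelp-all",
--         "--jelp-all-commands",
--         "--jelp-all-no-meta",
--     }
--     help_tokens = {"-h", "--help"}
--
--     if mode in {"help-only", "help-only-primed"} and any(
--         token in jelp_tokens for token in tokens
--     ):
--         return "jelp flags disallowed in help-only mode"
--
--     if mode in {"jelp-useful", "jelp-primed"} and any(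
--         token in {"--jelp-no-meta", "--jelp-all", "--jelp-all-no-meta"}
--         for token in tokens
--     ):
--         return "only --jelp/--jelp-pretty/--jelp-all-commands allowed in jelp-useful/jelp-primed modes"
--
--     if mode == "jelp-no-meta" and any(
--         token in {"--jelp", "--jelp-pretty", "--jelp-all", "--jelp-all-commands"}
--         for token in tokens
--     ):
--         return "only --jelp-no-meta/--jelp-all-no-meta allowed in jelp-no-meta mode"
--
--     if mode == "jelp-primed-incremental":
--         if any(token in help_tokens for token in tokens):
--             return "--help is disallowed in jelp-primed-incremental mode; use --jelp traversal"
--         if any(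
--             token
--             in {
--                 "--jelp-no-meta",
--                 "--jelp-all",
--                 "--jelp-all-commands",
--                 "--jelp-all-no-meta",
--             }
--             for token in tokens
--         ):
--             return "only --jelp/--jelp-pretty allowed in jelp-primed-incremental mode"
--
--     if mode == "jelp-primed-useful":
--         if any(token in help_tokens for token in tokens):
--             return "--help is disallowed in jelp-primed-useful mode; use --jelp"
--         if any(
--             token
--             in {
--                 "--jelp-pretty",
--                 "--jelp-no-meta",
--                 "--jelp-all",
--                 "--jelp-all-commands",
--                 "--jelp-all-no-meta",
--             }
--             for token in tokens
--         ):
--             return "only --jelp allowed in jelp-primed-useful mode"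
--
--     if mode == "jelp-primed-full":
--         if any(token in help_tokens for token in tokens):
--             return (
--                 "--help is disallowed in jelp-primed-full mode; use --jelp-all-commands"
--             )
--         if any(
--             token
--             in {
--                 "--jelp",
--                 "--jelp-pretty",
--                 "--jelp-no-meta",
--                 "--jelp-all",
--                 "--jelp-all-no-meta",
--             }
--             for token in tokens
--         ):
--             return "only --jelp-all-commands allowed in jelp-primed-full mode"
--
--     return None
-- ===== SOURCE B (Python) =====
-- _JELP = ("--jelp", "--jelp-pretty", "--jelp-no-meta", "--jelp-all",
--          "--jelp-all-commands", "--jelp-all-no-meta")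
--
-- # For each mode, map each offending token to the rank (index) of the check it
-- # triggers; the answer is the message of the minimum rank seen among the tokens.
-- _RANK = {
--     "help-only": {t: 0 for t in _JELP},
--     "help-only-primed": {t: 0 for t in _JELP},
--     "jelp-useful": {"--jelp-no-meta": 0, "--jelp-all": 0, "--jelp-all-no-meta": 0},
--     "jelp-primed": {"--jelp-no-meta": 0, "--jelp-all": 0, "--jelp-all-no-meta": 0},
--     "jelp-no-meta": {"--jelp": 0, "--jelp-pretty": 0, "--jelp-all": 0,
--                      "--jelp-all-commands": 0},
--     "jelp-primed-incremental": {"-h": 0, "--help": 0,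
--                                 "--jelp-no-meta": 1, "--jelp-all": 1,
--                                 "--jelp-all-commands": 1, "--jelp-all-no-meta": 1},
--     "jelp-primed-useful": {"-h": 0, "--help": 0,
--                            "--jelp-pretty": 1, "--jelp-no-meta": 1, "--jelp-all": 1,
--                            "--jelp-all-commands": 1, "--jelp-all-no-meta": 1},
--     "jelp-primed-full": {"-h": 0, "--help": 0,
--                          "--jelp": 1, "--jelp-pretty": 1, "--jelp-no-meta": 1,
--                          "--jelp-all": 1, "--jelp-all-no-meta": 1},
-- }
--
-- _MSGS = {
--     "help-only": ["jelp flags disallowed in help-only mode"],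
--     "help-only-primed": ["jelp flags disallowed in help-only mode"],
--     "jelp-useful": ["only --jelp/--jelp-pretty/--jelp-all-commands allowed in jelp-useful/jelp-primed modes"],
--     "jelp-primed": ["only --jelp/--jelp-pretty/--jelp-all-commands allowed in jelp-useful/jelp-primed modes"],
--     "jelp-no-meta": ["only --jelp-no-meta/--jelp-all-no-meta allowed in jelp-no-meta mode"],
--     "jelp-primed-incremental": [
--         "--help is disallowed in jelp-primed-incremental mode; use --jelp traversal",
--         "only --jelp/--jelp-pretty allowed in jelp-primed-incremental mode"],
--     "jelp-primed-useful": [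
--         "--help is disallowed in jelp-primed-useful mode; use --jelp",
--         "only --jelp allowed in jelp-primed-useful mode"],
--     "jelp-primed-full": [
--         "--help is disallowed in jelp-primed-full mode; use --jelp-all-commands",
--         "only --jelp-all-commands allowed in jelp-primed-full mode"],
-- }
--
--
-- def _policy_violation(mode: str, tokens: list[str]) -> str | None:
--     ranks = _RANK.get(mode)
--     if ranks is None:
--         return None
--     best = None
--     for t in tokens:
--         r = ranks.get(t)
--         if r is not None and (best is None or r < best):
--             best = r
--     return None if best is None else _MSGS[mode][best]
-- ===== Notes on version B (the rewrite author's own statement) =====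
-- stated objective: alternative
-- what changed: Instead of running each mode's checks as separate any-membership scans over the tokens, B makes a single pass over the tokens accumulating the minimum rank of any check a token triggers (via a per-mode token-to-rank map) and then returns the message at that rank.
import Mathlib
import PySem

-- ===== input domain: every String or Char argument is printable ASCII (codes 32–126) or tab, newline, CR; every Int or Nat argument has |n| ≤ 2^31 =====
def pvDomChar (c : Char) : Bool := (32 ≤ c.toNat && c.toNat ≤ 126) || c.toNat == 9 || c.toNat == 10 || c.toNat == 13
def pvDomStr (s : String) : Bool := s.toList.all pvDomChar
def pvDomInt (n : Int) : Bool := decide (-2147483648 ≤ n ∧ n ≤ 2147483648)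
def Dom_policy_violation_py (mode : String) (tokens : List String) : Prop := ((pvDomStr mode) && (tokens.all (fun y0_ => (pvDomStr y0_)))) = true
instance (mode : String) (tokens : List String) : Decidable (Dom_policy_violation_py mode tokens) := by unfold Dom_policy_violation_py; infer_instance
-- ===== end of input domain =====

-- B replaces A's per-check any-scans by a single pass over the tokens that accumulates the
-- minimum rank of any triggered check (per-mode token→rank map), then returns that rank's
-- message (objective: alternative).
set_option maxRecDepth 8000


-- ===== PORT A =====
-- literal port of A's if-chain; set literals become distinct-element lists (membership only)
def policy_violation_py (mode : String) (tokens : List String) : Option String :=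
  let jelp_tokens : List String :=
    ["--jelp", "--jelp-pretty", "--jelp-no-meta", "--jelp-all",
     "--jelp-all-commands", "--jelp-all-no-meta"]
  let help_tokens : List String := ["-h", "--help"]
  if (mode == "help-only" || mode == "help-only-primed")
      && tokens.any (fun t => jelp_tokens.contains t) then
    some "jelp flags disallowed in help-only mode"
  else if (mode == "jelp-useful" || mode == "jelp-primed")
      && tokens.any (fun t => (["--jelp-no-meta", "--jelp-all", "--jelp-all-no-meta"] : List String).contains t) then
    some "only --jelp/--jelp-pretty/--jelp-all-commands allowed in jelp-useful/jelp-primed modes"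
  else if mode == "jelp-no-meta"
      && tokens.any (fun t => (["--jelp", "--jelp-pretty", "--jelp-all", "--jelp-all-commands"] : List String).contains t) then
    some "only --jelp-no-meta/--jelp-all-no-meta allowed in jelp-no-meta mode"
  else if mode == "jelp-primed-incremental"
      && tokens.any (fun t => help_tokens.contains t) then
    some "--help is disallowed in jelp-primed-incremental mode; use --jelp traversal"
  else if mode == "jelp-primed-incremental"
      && tokens.any (fun t => (["--jelp-no-meta", "--jelp-all", "--jelp-all-commands", "--jelp-all-no-meta"] : List String).contains t) then
    some "only --jelp/--jelp-pretty allowed in jelp-primed-incremental mode"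
  else if mode == "jelp-primed-useful"
      && tokens.any (fun t => help_tokens.contains t) then
    some "--help is disallowed in jelp-primed-useful mode; use --jelp"
  else if mode == "jelp-primed-useful"
      && tokens.any (fun t => (["--jelp-pretty", "--jelp-no-meta", "--jelp-all", "--jelp-all-commands", "--jelp-all-no-meta"] : List String).contains t) then
    some "only --jelp allowed in jelp-primed-useful mode"
  else if mode == "jelp-primed-full"
      && tokens.any (fun t => help_tokens.contains t) then
    some "--help is disallowed in jelp-primed-full mode; use --jelp-all-commands"
  else if mode == "jelp-primed-full"
      && tokens.any (fun t => (["--jelp", "--jelp-pretty", "--jelp-no-meta", "--jelp-all", "--jelp-all-no-meta"] : List String).contains t) then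
    some "only --jelp-all-commands allowed in jelp-primed-full mode"
  else
    none

-- ===== PORT B =====
-- the per-mode token→rank dicts of Source B's _RANK
def pvRanksHO : PySem.Dict String Int := PySem.Dict.ofList
  [("--jelp", 0), ("--jelp-pretty", 0), ("--jelp-no-meta", 0), ("--jelp-all", 0),
   ("--jelp-all-commands", 0), ("--jelp-all-no-meta", 0)]
def pvRanksJU : PySem.Dict String Int := PySem.Dict.ofList
  [("--jelp-no-meta", 0), ("--jelp-all", 0), ("--jelp-all-no-meta", 0)]
def pvRanksJNM : PySem.Dict String Int := PySem.Dict.ofList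
  [("--jelp", 0), ("--jelp-pretty", 0), ("--jelp-all", 0), ("--jelp-all-commands", 0)]
def pvRanksJPI : PySem.Dict String Int := PySem.Dict.ofList
  [("-h", 0), ("--help", 0),
   ("--jelp-no-meta", 1), ("--jelp-all", 1), ("--jelp-all-commands", 1), ("--jelp-all-no-meta", 1)]
def pvRanksJPU : PySem.Dict String Int := PySem.Dict.ofList
  [("-h", 0), ("--help", 0),
   ("--jelp-pretty", 1), ("--jelp-no-meta", 1), ("--jelp-all", 1),
   ("--jelp-all-commands", 1), ("--jelp-all-no-meta", 1)]
def pvRanksJPF : PySem.Dict String Int := PySem.Dict.ofList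
  [("-h", 0), ("--help", 0),
   ("--jelp", 1), ("--jelp-pretty", 1), ("--jelp-no-meta", 1),
   ("--jelp-all", 1), ("--jelp-all-no-meta", 1)]

def pvRankTable : PySem.Dict String (PySem.Dict String Int) := PySem.Dict.ofList
  [("help-only", pvRanksHO), ("help-only-primed", pvRanksHO),
   ("jelp-useful", pvRanksJU), ("jelp-primed", pvRanksJU),
   ("jelp-no-meta", pvRanksJNM),
   ("jelp-primed-incremental", pvRanksJPI),
   ("jelp-primed-useful", pvRanksJPU),
   ("jelp-primed-full", pvRanksJPF)]

-- Source B's _MSGS: mode → message per rank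
def pvMsgTable : PySem.Dict String (List String) := PySem.Dict.ofList
  [("help-only", ["jelp flags disallowed in help-only mode"]),
   ("help-only-primed", ["jelp flags disallowed in help-only mode"]),
   ("jelp-useful", ["only --jelp/--jelp-pretty/--jelp-all-commands allowed in jelp-useful/jelp-primed modes"]),
   ("jelp-primed", ["only --jelp/--jelp-pretty/--jelp-all-commands allowed in jelp-useful/jelp-primed modes"]),
   ("jelp-no-meta", ["only --jelp-no-meta/--jelp-all-no-meta allowed in jelp-no-meta mode"]),
   ("jelp-primed-incremental",
    ["--help is disallowed in jelp-primed-incremental mode; use --jelp traversal",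
     "only --jelp/--jelp-pretty allowed in jelp-primed-incremental mode"]),
   ("jelp-primed-useful",
    ["--help is disallowed in jelp-primed-useful mode; use --jelp",
     "only --jelp allowed in jelp-primed-useful mode"]),
   ("jelp-primed-full",
    ["--help is disallowed in jelp-primed-full mode; use --jelp-all-commands",
     "only --jelp-all-commands allowed in jelp-primed-full mode"])]

-- the single-pass loop of Source B: running minimum of the ranks the tokens hit
def pvMinRank (ranks : PySem.Dict String Int) : List String → Option Int → Option Int
  | [], best => best
  | t :: ts, best =>
    pvMinRank ranks ts
      (match ranks.get? t with
       | none => best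
       | some r => match best with
         | none => some r
         | some b => if r < b then some r else some b)

def policy_violation_py_alt (mode : String) (tokens : List String) : Option String :=
  match pvRankTable.get? mode with
  | none => none
  | some ranks =>
    match pvMinRank ranks tokens none with
    | none => none
    -- _MSGS[mode][best]: the key is always present and the index always in range,
    -- so pyGet? is always some here
    | some b => PySem.List.pyGet? (pvMsgTable.getD mode []) b

-- ===== PRECONDITION & SPEC =====
def Spec_policy_violation_py (mode : String) (tokens : List String) (out : Option String) : Prop := out = policy_violation_py_alt mode tokens
instance (mode : String) (tokens : List String) (out : Option String) : Decidable (Spec_policy_violation_py mode tokens out) := by unfold Spec_policy_violation_py; infer_instance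

-- ===== CLAIM =====
def Claim_equal_policy_violation_py : Prop := ∀ (mode : String) (tokens : List String), Dom_policy_violation_py mode tokens → Spec_policy_violation_py mode tokens (policy_violation_py mode tokens)

-- ===== LEMMAS AND PROOFS =====
-- option-min combinator used only to characterise the loop
def pvOMin : Option Int → Option Int → Option Int
  | none, b => b
  | some x, none => some x
  | some x, some y => some (min x y)

theorem pvMinRank_go (ranks : PySem.Dict String Int)
    (hv : ∀ t r, ranks.get? t = some r → r = 0 ∨ r = 1) :
    ∀ (ts : List String) (acc : Option Int), (acc = none ∨ acc = some 0 ∨ acc = some 1) →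
    pvMinRank ranks ts acc =
      pvOMin acc
        (if ts.any (fun t => ranks.get? t == some 0) then some 0
         else if ts.any (fun t => ranks.get? t == some 1) then some 1
         else none) := by
  intro ts
  induction ts with
  | nil =>
    intro acc hacc
    rcases hacc with rfl | rfl | rfl <;> simp [pvMinRank, pvOMin]
  | cons t ts ih =>
    intro acc hacc
    rw [pvMinRank]
    cases h : ranks.get? t with
    | none =>
      rw [ih acc hacc]
      rcases hacc with rfl | rfl | rfl <;>
        cases h0 : ts.any (fun t => ranks.get? t == some 0) <;>
        cases h1 : ts.any (fun t => ranks.get? t == some 1) <;>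
        simp [pvOMin, h, h0, h1]
    | some r =>
      rcases hv t r h with rfl | rfl <;>
      · rcases hacc with rfl | rfl | rfl <;>
        · rw [ih _ (by simp)]
          cases h0 : ts.any (fun t => ranks.get? t == some 0) <;>
          cases h1 : ts.any (fun t => ranks.get? t == some 1) <;>
          simp [pvOMin, h, h0, h1]

theorem pvMinRank_none (ranks : PySem.Dict String Int)
    (hv : ∀ t r, ranks.get? t = some r → r = 0 ∨ r = 1) (ts : List String) :
    pvMinRank ranks ts none =
      (if ts.any (fun t => ranks.get? t == some 0) then some 0
       else if ts.any (fun t => ranks.get? t == some 1) then some 1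
       else none) := by
  rw [pvMinRank_go ranks hv ts none (Or.inl rfl)]
  cases h0 : ts.any (fun t => ranks.get? t == some 0) <;>
  cases h1 : ts.any (fun t => ranks.get? t == some 1) <;>
  simp [pvOMin]

-- pointwise characterisation of each rank dict as membership in A's literal lists
theorem pvRanksHO_get (t : String) :
    pvRanksHO.get? t =
      (if (["--jelp", "--jelp-pretty", "--jelp-no-meta", "--jelp-all",
            "--jelp-all-commands", "--jelp-all-no-meta"] : List String).contains t
       then some 0 else none) := by
  rw [show pvRanksHO = PySem.Dict.mk
    [("--jelp", 0), ("--jelp-pretty", 0), ("--jelp-no-meta", 0), ("--jelp-all", 0),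
     ("--jelp-all-commands", 0), ("--jelp-all-no-meta", 0)] from rfl]
  simp only [PySem.Dict.get?_mk_cons, List.contains_cons, List.contains_nil,
    show ∀ t : String, (PySem.Dict.mk ([] : List (String × Int))).get? t = none from fun _ => rfl,
    beq_iff_eq, Bool.or_false, Bool.or_eq_true]
  split_ifs <;> first | rfl | simp_all [eq_comm]

theorem pvRanksJU_get (t : String) :
    pvRanksJU.get? t =
      (if (["--jelp-no-meta", "--jelp-all", "--jelp-all-no-meta"] : List String).contains t
       then some 0 else none) := by
  rw [show pvRanksJU = PySem.Dict.mk
    [("--jelp-no-meta", 0), ("--jelp-all", 0), ("--jelp-all-no-meta", 0)] from rfl]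
  simp only [PySem.Dict.get?_mk_cons, List.contains_cons, List.contains_nil,
    show ∀ t : String, (PySem.Dict.mk ([] : List (String × Int))).get? t = none from fun _ => rfl,
    beq_iff_eq, Bool.or_false, Bool.or_eq_true]
  split_ifs <;> first | rfl | simp_all [eq_comm]

theorem pvRanksJNM_get (t : String) :
    pvRanksJNM.get? t =
      (if (["--jelp", "--jelp-pretty", "--jelp-all", "--jelp-all-commands"] : List String).contains t
       then some 0 else none) := by
  rw [show pvRanksJNM = PySem.Dict.mk
    [("--jelp", 0), ("--jelp-pretty", 0), ("--jelp-all", 0), ("--jelp-all-commands", 0)] from rfl]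
  simp only [PySem.Dict.get?_mk_cons, List.contains_cons, List.contains_nil,
    show ∀ t : String, (PySem.Dict.mk ([] : List (String × Int))).get? t = none from fun _ => rfl,
    beq_iff_eq, Bool.or_false, Bool.or_eq_true]
  split_ifs <;> first | rfl | simp_all [eq_comm]

theorem pvRanksJPI_get (t : String) :
    pvRanksJPI.get? t =
      (if (["-h", "--help"] : List String).contains t then some 0
       else if (["--jelp-no-meta", "--jelp-all", "--jelp-all-commands",
                 "--jelp-all-no-meta"] : List String).contains t then some 1
       else none) := by
  rw [show pvRanksJPI = PySem.Dict.mk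
    [("-h", 0), ("--help", 0), ("--jelp-no-meta", 1), ("--jelp-all", 1),
     ("--jelp-all-commands", 1), ("--jelp-all-no-meta", 1)] from rfl]
  simp only [PySem.Dict.get?_mk_cons, List.contains_cons, List.contains_nil,
    show ∀ t : String, (PySem.Dict.mk ([] : List (String × Int))).get? t = none from fun _ => rfl,
    beq_iff_eq, Bool.or_false, Bool.or_eq_true]
  split_ifs <;> first | rfl | simp_all [eq_comm]

theorem pvRanksJPU_get (t : String) :
    pvRanksJPU.get? t =
      (if (["-h", "--help"] : List String).contains t then some 0
       else if (["--jelp-pretty", "--jelp-no-meta", "--jelp-all",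
                 "--jelp-all-commands", "--jelp-all-no-meta"] : List String).contains t then some 1
       else none) := by
  rw [show pvRanksJPU = PySem.Dict.mk
    [("-h", 0), ("--help", 0), ("--jelp-pretty", 1), ("--jelp-no-meta", 1),
     ("--jelp-all", 1), ("--jelp-all-commands", 1), ("--jelp-all-no-meta", 1)] from rfl]
  simp only [PySem.Dict.get?_mk_cons, List.contains_cons, List.contains_nil,
    show ∀ t : String, (PySem.Dict.mk ([] : List (String × Int))).get? t = none from fun _ => rfl,
    beq_iff_eq, Bool.or_false, Bool.or_eq_true]
  split_ifs <;> first | rfl | simp_all [eq_comm]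

theorem pvRanksJPF_get (t : String) :
    pvRanksJPF.get? t =
      (if (["-h", "--help"] : List String).contains t then some 0
       else if (["--jelp", "--jelp-pretty", "--jelp-no-meta", "--jelp-all",
                 "--jelp-all-no-meta"] : List String).contains t then some 1
       else none) := by
  rw [show pvRanksJPF = PySem.Dict.mk
    [("-h", 0), ("--help", 0), ("--jelp", 1), ("--jelp-pretty", 1),
     ("--jelp-no-meta", 1), ("--jelp-all", 1), ("--jelp-all-no-meta", 1)] from rfl]
  simp only [PySem.Dict.get?_mk_cons, List.contains_cons, List.contains_nil,
    show ∀ t : String, (PySem.Dict.mk ([] : List (String × Int))).get? t = none from fun _ => rfl,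
    beq_iff_eq, Bool.or_false, Bool.or_eq_true]
  split_ifs <;> first | rfl | simp_all [eq_comm]

theorem pv_get_default (mode : String)
    (h1 : mode ≠ "help-only") (h2 : mode ≠ "help-only-primed")
    (h3 : mode ≠ "jelp-useful") (h4 : mode ≠ "jelp-primed")
    (h5 : mode ≠ "jelp-no-meta") (h6 : mode ≠ "jelp-primed-incremental")
    (h7 : mode ≠ "jelp-primed-useful") (h8 : mode ≠ "jelp-primed-full") :
    pvRankTable.get? mode = none := by
  simp [pvRankTable, PySem.Dict.ofList, PySem.Dict.update,
    PySem.Dict.get?_insert, PySem.Dict.get?_empty, h1, h2, h3, h4, h5, h6, h7, h8]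

theorem pv_hv_of_one (ranks : PySem.Dict String Int) (S0 : List String)
    (hg : ∀ t, ranks.get? t = (if S0.contains t then some 0 else none)) :
    ∀ t r, ranks.get? t = some r → r = 0 ∨ r = 1 := by
  intro t r h
  rw [hg t] at h
  split_ifs at h <;> simp_all

theorem pv_hv_of_two (ranks : PySem.Dict String Int) (S0 S1 : List String)
    (hg : ∀ t, ranks.get? t =
      (if S0.contains t then some 0 else if S1.contains t then some 1 else none)) :
    ∀ t r, ranks.get? t = some r → r = 0 ∨ r = 1 := by
  intro t r h
  rw [hg t] at h
  split_ifs at h <;> simp_all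

theorem pv_e0_of_one (ranks : PySem.Dict String Int) (S0 : List String)
    (hg : ∀ t, ranks.get? t = (if S0.contains t then some 0 else none)) :
    (fun t => ranks.get? t == some 0) = (fun t => S0.contains t) := by
  funext t
  rw [hg t]
  split_ifs with h <;> simp_all

theorem pv_e1_of_one (ranks : PySem.Dict String Int) (S0 : List String)
    (hg : ∀ t, ranks.get? t = (if S0.contains t then some 0 else none)) :
    (fun t => ranks.get? t == some 1) = (fun _ => false) := by
  funext t
  rw [hg t]
  split_ifs with h <;> simp_all

theorem pv_e0_of_two (ranks : PySem.Dict String Int) (S0 S1 : List String)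
    (hg : ∀ t, ranks.get? t =
      (if S0.contains t then some 0 else if S1.contains t then some 1 else none)) :
    (fun t => ranks.get? t == some 0) = (fun t => S0.contains t) := by
  funext t
  rw [hg t]
  split_ifs with h h1 <;> simp_all

theorem pv_e1_of_two (ranks : PySem.Dict String Int) (S0 S1 : List String)
    (hg : ∀ t, ranks.get? t =
      (if S0.contains t then some 0 else if S1.contains t then some 1 else none))
    (hd : ∀ x, x ∈ S0 → x ∈ S1 → False) :
    (fun t => ranks.get? t == some 1) = (fun t => S1.contains t) := by
  funext t
  rw [hg t]
  by_cases h : S1.contains t = true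
  · have h0 : ¬ S0.contains t = true := by
      intro hs
      exact hd t (by simpa using hs) (by simpa using h)
    simp_all
  · split_ifs <;> simp_all

theorem policy_violation_eq (mode : String) (tokens : List String) :
    policy_violation_py mode tokens = policy_violation_py_alt mode tokens := by
  by_cases h1 : mode = "help-only"
  · subst h1
    rw [show policy_violation_py_alt "help-only" tokens =
        (match pvMinRank pvRanksHO tokens none with
         | none => none
         | some b => PySem.List.pyGet? (["jelp flags disallowed in help-only mode"] : List String) b) from rfl,
      pvMinRank_none _ (pv_hv_of_one _ _ pvRanksHO_get),
      pv_e0_of_one _ _ pvRanksHO_get, pv_e1_of_one _ _ pvRanksHO_get]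
    cases h0 : tokens.any (fun t => (["--jelp", "--jelp-pretty", "--jelp-no-meta", "--jelp-all", "--jelp-all-commands", "--jelp-all-no-meta"] : List String).contains t) <;>
      simp_all [policy_violation_py, PySem.List.pyGet?, PySem.List.pyIdx?]
  by_cases h2 : mode = "help-only-primed"
  · subst h2
    rw [show policy_violation_py_alt "help-only-primed" tokens =
        (match pvMinRank pvRanksHO tokens none with
         | none => none
         | some b => PySem.List.pyGet? (["jelp flags disallowed in help-only mode"] : List String) b) from rfl,
      pvMinRank_none _ (pv_hv_of_one _ _ pvRanksHO_get),
      pv_e0_of_one _ _ pvRanksHO_get, pv_e1_of_one _ _ pvRanksHO_get]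
    cases h0 : tokens.any (fun t => (["--jelp", "--jelp-pretty", "--jelp-no-meta", "--jelp-all", "--jelp-all-commands", "--jelp-all-no-meta"] : List String).contains t) <;>
      simp_all [policy_violation_py, PySem.List.pyGet?, PySem.List.pyIdx?]
  by_cases h3 : mode = "jelp-useful"
  · subst h3
    rw [show policy_violation_py_alt "jelp-useful" tokens =
        (match pvMinRank pvRanksJU tokens none with
         | none => none
         | some b => PySem.List.pyGet? (["only --jelp/--jelp-pretty/--jelp-all-commands allowed in jelp-useful/jelp-primed modes"] : List String) b) from rfl,
      pvMinRank_none _ (pv_hv_of_one _ _ pvRanksJU_get),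
      pv_e0_of_one _ _ pvRanksJU_get, pv_e1_of_one _ _ pvRanksJU_get]
    cases h0 : tokens.any (fun t => (["--jelp-no-meta", "--jelp-all", "--jelp-all-no-meta"] : List String).contains t) <;>
      simp_all [policy_violation_py, PySem.List.pyGet?, PySem.List.pyIdx?]
  by_cases h4 : mode = "jelp-primed"
  · subst h4
    rw [show policy_violation_py_alt "jelp-primed" tokens =
        (match pvMinRank pvRanksJU tokens none with
         | none => none
         | some b => PySem.List.pyGet? (["only --jelp/--jelp-pretty/--jelp-all-commands allowed in jelp-useful/jelp-primed modes"] : List String) b) from rfl,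
      pvMinRank_none _ (pv_hv_of_one _ _ pvRanksJU_get),
      pv_e0_of_one _ _ pvRanksJU_get, pv_e1_of_one _ _ pvRanksJU_get]
    cases h0 : tokens.any (fun t => (["--jelp-no-meta", "--jelp-all", "--jelp-all-no-meta"] : List String).contains t) <;>
      simp_all [policy_violation_py, PySem.List.pyGet?, PySem.List.pyIdx?]
  by_cases h5 : mode = "jelp-no-meta"
  · subst h5
    rw [show policy_violation_py_alt "jelp-no-meta" tokens =
        (match pvMinRank pvRanksJNM tokens none with
         | none => none
         | some b => PySem.List.pyGet? (["only --jelp-no-meta/--jelp-all-no-meta allowed in jelp-no-meta mode"] : List String) b) from rfl,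
      pvMinRank_none _ (pv_hv_of_one _ _ pvRanksJNM_get),
      pv_e0_of_one _ _ pvRanksJNM_get, pv_e1_of_one _ _ pvRanksJNM_get]
    cases h0 : tokens.any (fun t => (["--jelp", "--jelp-pretty", "--jelp-all", "--jelp-all-commands"] : List String).contains t) <;>
      simp_all [policy_violation_py, PySem.List.pyGet?, PySem.List.pyIdx?]
  by_cases h6 : mode = "jelp-primed-incremental"
  · subst h6
    rw [show policy_violation_py_alt "jelp-primed-incremental" tokens =
        (match pvMinRank pvRanksJPI tokens none with
         | none => none
         | some b => PySem.List.pyGet? (["--help is disallowed in jelp-primed-incremental mode; use --jelp traversal", "only --jelp/--jelp-pretty allowed in jelp-primed-incremental mode"] : List String) b) from rfl,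
      pvMinRank_none _ (pv_hv_of_two _ _ _ pvRanksJPI_get),
      pv_e0_of_two _ _ _ pvRanksJPI_get, pv_e1_of_two _ _ _ pvRanksJPI_get (by decide)]
    cases h0 : tokens.any (fun t => (["-h", "--help"] : List String).contains t) <;>
    cases hb : tokens.any (fun t => (["--jelp-no-meta", "--jelp-all", "--jelp-all-commands", "--jelp-all-no-meta"] : List String).contains t) <;>
      simp_all [policy_violation_py, PySem.List.pyGet?, PySem.List.pyIdx?] <;>
      (split_ifs with hA hB <;>
        first
        | rfl
        | (exfalso; rcases hA with ⟨x, hx, hq⟩; have := h0 x hx; tauto)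
        | (exfalso; rcases hB with ⟨x, hx, hq⟩; have := hb x hx; tauto))
  by_cases h7 : mode = "jelp-primed-useful"
  · subst h7
    rw [show policy_violation_py_alt "jelp-primed-useful" tokens =
        (match pvMinRank pvRanksJPU tokens none with
         | none => none
         | some b => PySem.List.pyGet? (["--help is disallowed in jelp-primed-useful mode; use --jelp", "only --jelp allowed in jelp-primed-useful mode"] : List String) b) from rfl,
      pvMinRank_none _ (pv_hv_of_two _ _ _ pvRanksJPU_get),
      pv_e0_of_two _ _ _ pvRanksJPU_get, pv_e1_of_two _ _ _ pvRanksJPU_get (by decide)]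
    cases h0 : tokens.any (fun t => (["-h", "--help"] : List String).contains t) <;>
    cases hb : tokens.any (fun t => (["--jelp-pretty", "--jelp-no-meta", "--jelp-all", "--jelp-all-commands", "--jelp-all-no-meta"] : List String).contains t) <;>
      simp_all [policy_violation_py, PySem.List.pyGet?, PySem.List.pyIdx?] <;>
      (split_ifs with hA hB <;>
        first
        | rfl
        | (exfalso; rcases hA with ⟨x, hx, hq⟩; have := h0 x hx; tauto)
        | (exfalso; rcases hB with ⟨x, hx, hq⟩; have := hb x hx; tauto))
  by_cases h8 : mode = "jelp-primed-full"
  · subst h8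
    rw [show policy_violation_py_alt "jelp-primed-full" tokens =
        (match pvMinRank pvRanksJPF tokens none with
         | none => none
         | some b => PySem.List.pyGet? (["--help is disallowed in jelp-primed-full mode; use --jelp-all-commands", "only --jelp-all-commands allowed in jelp-primed-full mode"] : List String) b) from rfl,
      pvMinRank_none _ (pv_hv_of_two _ _ _ pvRanksJPF_get),
      pv_e0_of_two _ _ _ pvRanksJPF_get, pv_e1_of_two _ _ _ pvRanksJPF_get (by decide)]
    cases h0 : tokens.any (fun t => (["-h", "--help"] : List String).contains t) <;>
    cases hb : tokens.any (fun t => (["--jelp", "--jelp-pretty", "--jelp-no-meta", "--jelp-all", "--jelp-all-no-meta"] : List String).contains t) <;>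
      simp_all [policy_violation_py, PySem.List.pyGet?, PySem.List.pyIdx?] <;>
      (split_ifs with hA hB <;>
        first
        | rfl
        | (exfalso; rcases hA with ⟨x, hx, hq⟩; have := h0 x hx; tauto)
        | (exfalso; rcases hB with ⟨x, hx, hq⟩; have := hb x hx; tauto))
  · rw [policy_violation_py_alt, pv_get_default mode h1 h2 h3 h4 h5 h6 h7 h8]
    simp [policy_violation_py, h1, h2, h3, h4, h5, h6, h7, h8]

-- ===== VERDICT =====
theorem policy_violation_py_spec : Claim_equal_policy_violation_py := by
  intro mode tokens _
  exact policy_violation_eq mode tokens
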